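-- pv_equiv track=rewrite | github.com/ChristerNilsson/2021 | 008-CodeForces-1100/1481B/1481B.py | f
-- ===== SOURCE A (Python) =====
-- def f(k,arr):
-- 	index = -2
-- 	i = 0
-- 	while i < len(arr)-1:
-- 		if arr[i] < arr[i+1]:
-- 			k -= 1
-- 			arr[i] += 1
-- 			if k <= 0: return i+1
-- 			if i > 0: i -= 1
-- 		else:
-- 			i += 1
-- 	return index+1
-- ===== SOURCE B (Python) =====
-- def f(k, arr):
--     # Naive simulation: each boulder restarts from index 0 (mutates arr in place, like A).
--     while True:
--         i = 0
--         while i + 1 < len(arr) and arr[i] >= arr[i + 1]: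
--             i += 1
--         if i + 1 >= len(arr):
--             return -1
--         k -= 1
--         arr[i] += 1
--         if k <= 0:
--             return i + 1
-- ===== Notes on version B (the rewrite author's own statement) =====
-- stated objective: simpler
-- what changed: Replaces A's amortized step-back pointer (which backs up one index after each boulder placement) with the plain simulation that rolls every boulder from index 0 via a full inner scan.
import Mathlib
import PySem

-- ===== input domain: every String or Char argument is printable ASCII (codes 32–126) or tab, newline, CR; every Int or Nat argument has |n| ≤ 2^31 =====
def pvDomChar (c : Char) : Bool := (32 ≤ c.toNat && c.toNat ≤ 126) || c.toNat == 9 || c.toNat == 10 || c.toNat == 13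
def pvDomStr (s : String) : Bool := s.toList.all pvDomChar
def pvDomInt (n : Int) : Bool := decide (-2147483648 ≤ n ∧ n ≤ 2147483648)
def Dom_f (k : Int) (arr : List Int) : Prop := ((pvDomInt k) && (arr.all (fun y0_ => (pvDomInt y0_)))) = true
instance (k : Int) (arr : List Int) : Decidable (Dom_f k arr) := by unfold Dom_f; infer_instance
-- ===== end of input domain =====

-- B replaces A's step-back pointer by a simpler naive simulation that restarts each
-- boulder's roll from index 0 (objective: simpler).  Both Pythons mutate `arr` in
-- place identically; the theorems below are about the return value.

-- ===== PORT A =====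
-- A's pointer `i` starts at 0 and is decremented only under the guard `i > 0`, so it
-- stays ≥ 0 in Python and is ported as Nat; Python's `i < len(arr)-1` on ints equals
-- `i + 1 < arr.length` on Nat (for len = 0 both are false).  `arr[i]`/`arr[i+1]` are
-- only read with i+1 < len, so always in range: `List.getD _ _ 0` is exact here.
-- termination measures (cited by name in decreasing_by; keeps the ports' bodies small)
theorem toNat_pred_lt (k : Int) (hk : ¬ k - 1 ≤ 0) : (k - 1).toNat < k.toNat := by
  have h2 : k - 1 < k := sub_one_lt k
  have h1 : 0 < k - 1 := lt_of_not_ge hk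
  exact (Int.toNat_lt_toNat (lt_trans h1 h2)).mpr h2

theorem sub_succ_lt (n i : Nat) (h : i + 1 < n) : n - (i+1) < n - i :=
  Nat.sub_succ_lt_self n i (Nat.lt_of_succ_lt h)

theorem fA_dec1 (k : Int) (arr : List Int) (i : Nat) (hk : ¬ k - 1 ≤ 0) :
    Prod.Lex (· < ·) (· < ·) ((k - 1).toNat, (arr.set i (arr.getD i 0 + 1)).length - (i - 1))
      (k.toNat, arr.length - i) :=
  Prod.Lex.left _ _ (toNat_pred_lt k hk)

theorem fA_dec2 (k : Int) (arr : List Int) (i : Nat) (hk : ¬ k - 1 ≤ 0) :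
    Prod.Lex (· < ·) (· < ·) ((k - 1).toNat, (arr.set i (arr.getD i 0 + 1)).length - 0)
      (k.toNat, arr.length - i) :=
  Prod.Lex.left _ _ (toNat_pred_lt k hk)

theorem fA_dec3 (k : Int) (arr : List Int) (i : Nat) (h : i + 1 < arr.length) :
    Prod.Lex (· < ·) (· < ·) (k.toNat, arr.length - (i+1)) (k.toNat, arr.length - i) :=
  Prod.Lex.right _ (sub_succ_lt arr.length i h)

def fA (k : Int) (arr : List Int) (i : Nat) : Int :=
  if h : i + 1 < arr.length then
    if arr.getD i 0 < arr.getD (i+1) 0 then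
      -- k -= 1; arr[i] += 1 (written inline)
      if hk : k - 1 ≤ 0 then (i : Int) + 1
      else if i > 0 then fA (k-1) (arr.set i (arr.getD i 0 + 1)) (i-1)
      else fA (k-1) (arr.set i (arr.getD i 0 + 1)) 0
    else fA k arr (i+1)
  else -1
termination_by (k.toNat, arr.length - i)
decreasing_by
  · exact fA_dec1 k arr i hk
  · exact fA_dec2 k arr i hk
  · exact fA_dec3 k arr i h

def f (k : Int) (arr : List Int) : Int := fA k arr 0

-- ===== PORT B =====
-- inner `while i + 1 < len(arr) and arr[i] >= arr[i+1]: i += 1`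
def fScan (arr : List Int) (i : Nat) : Nat :=
  if h : i + 1 < arr.length ∧ arr.getD i 0 ≥ arr.getD (i+1) 0 then fScan arr (i+1) else i
termination_by arr.length - i
decreasing_by exact sub_succ_lt arr.length i h.1

-- outer `while True` loop of B
def fOuter (k : Int) (arr : List Int) : Int :=
  let i := fScan arr 0
  if i + 1 ≥ arr.length then -1
  else
    -- k -= 1; arr[i] += 1 (written inline)
    if hk : k - 1 ≤ 0 then (i : Int) + 1
    else fOuter (k-1) (arr.set i (arr.getD i 0 + 1))
termination_by k.toNat
decreasing_by exact toNat_pred_lt k hk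

def f_alt (k : Int) (arr : List Int) : Int := fOuter k arr

-- ===== PRECONDITION & SPEC =====
def Spec_f (k : Int) (arr : List Int) (out : Int) : Prop := out = f_alt k arr
instance (k : Int) (arr : List Int) (out : Int) : Decidable (Spec_f k arr out) := by unfold Spec_f; infer_instance

-- ===== CLAIM (what is proved, stated in full; the proofs are below) =====
def Claim_equal_f : Prop := ∀ (k : Int) (arr : List Int), Dom_f k arr → Spec_f k arr (f k arr)

-- ===== LEMMAS AND PROOFS =====

theorem getD_set_ne (l : List Int) (i j : Nat) (v : Int) (h : i ≠ j) :
    (l.set i v).getD j 0 = l.getD j 0 := by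
  simp [List.getD_eq_getElem?_getD, List.getElem?_set_ne h]

-- If the whole array is non-increasing from position i on, the scan falls off the end.
theorem fScan_off (arr : List Int) (i : Nat)
    (h : ∀ j, i ≤ j → j + 1 < arr.length → arr.getD j 0 ≥ arr.getD (j+1) 0) :
    fScan arr i + 1 ≥ arr.length := by
  fun_induction fScan arr i with
  | case1 i hc ih => exact ih (fun j hj => h j (by omega))
  | case2 i hc =>
    by_cases hl : i + 1 < arr.length
    · exact absurd ⟨hl, h i le_rfl hl⟩ hc
    · omega

-- If positions before `stop` (from i on) are non-increasing and `stop` is a strict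
-- ascent, the scan started at i ≤ stop returns exactly `stop`.
theorem fScan_find (arr : List Int) (stop : Nat) (hs : stop + 1 < arr.length)
    (hstop : arr.getD stop 0 < arr.getD (stop+1) 0) :
    ∀ i, i ≤ stop → (∀ j, i ≤ j → j < stop → arr.getD j 0 ≥ arr.getD (j+1) 0) →
    fScan arr i = stop := by
  intro i
  fun_induction fScan arr i with
  | case1 i hc ih =>
    intro hle h
    rcases eq_or_lt_of_le hle with rfl | hlt
    · exact absurd hc.2 (by omega)
    · exact ih (by omega) (fun j hj => h j (by omega))
  | case2 i hc =>
    intro hle h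
    rcases eq_or_lt_of_le hle with rfl | hlt
    · rfl
    · exact absurd ⟨by omega, h i le_rfl hlt⟩ hc

-- Main invariant: when everything strictly left of A's pointer is non-increasing,
-- A's continuation from i equals B's restart-from-0 simulation.
theorem fA_eq_fOuter (k : Int) (arr : List Int) (i : Nat) :
    (∀ j, j < i → j + 1 < arr.length → arr.getD j 0 ≥ arr.getD (j+1) 0) →
    fA k arr i = fOuter k arr := by
  induction k, arr, i using fA.induct with
  | case1 k arr i h hlt hk =>
    -- k - 1 ≤ 0 : both place one boulder at i and return i+1
    intro hinv
    have hsc : fScan arr 0 = i :=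
      fScan_find arr i h hlt 0 (Nat.zero_le _) (fun j _ hj => hinv j hj (by omega))
    rw [fA, fOuter]; simp only [hsc]
    rw [dif_pos h, if_pos hlt, dif_pos hk, if_neg (by omega), dif_pos hk]
  | case2 k arr i h hlt hk hi ih =>
    -- placement, i > 0, step back to i-1
    intro hinv
    have hsc : fScan arr 0 = i :=
      fScan_find arr i h hlt 0 (Nat.zero_le _) (fun j _ hj => hinv j hj (by omega))
    have harr' : ∀ j, j < i - 1 → j + 1 < (arr.set i (arr.getD i 0 + 1)).length →
        (arr.set i (arr.getD i 0 + 1)).getD j 0 ≥ (arr.set i (arr.getD i 0 + 1)).getD (j+1) 0 := by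
      intro j hj hl
      simp only [List.length_set] at hl
      rw [getD_set_ne _ _ _ _ (by omega), getD_set_ne _ _ _ _ (by omega)]
      exact hinv j (by omega) hl
    rw [fA, fOuter]; simp only [hsc]
    rw [dif_pos h, if_pos hlt, dif_neg hk, if_pos hi, ih harr',
        if_neg (by omega), dif_neg hk]
  | case3 k arr i h hlt hk hi ih =>
    -- placement at i = 0, stay at 0
    intro hinv
    have hi0 : i = 0 := by omega
    subst hi0
    have hsc : fScan arr 0 = 0 :=
      fScan_find arr 0 h hlt 0 le_rfl (by omega)
    rw [fA, fOuter]; simp only [hsc]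
    rw [dif_pos h, if_pos hlt, dif_neg hk, if_neg hi, ih (fun j hj => by omega),
        if_neg (by omega), dif_neg hk]
  | case4 k arr i h hge ih =>
    -- arr[i] ≥ arr[i+1]: advance the pointer; invariant extends to i+1
    intro hinv
    rw [fA, dif_pos h, if_neg hge]
    refine ih (fun j hj hl => ?_)
    rcases Nat.lt_or_ge j i with hji | hji
    · exact hinv j hji hl
    · have : j = i := by omega
      subst this; omega
  | case5 k arr i h =>
    -- pointer fell off: the whole array is non-increasing, B's scan falls off too
    intro hinv
    have hoff : fScan arr 0 + 1 ≥ arr.length :=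
      fScan_off arr 0 (fun j _ hl => hinv j (by omega) hl)
    rw [fA, dif_neg h, fOuter]
    simp only [if_pos hoff]

-- ===== VERDICT (by name: the statement is the Claim_ definition above) =====
theorem f_spec : Claim_equal_f := by
  intro k arr _
  unfold Spec_f f f_alt
  exact fA_eq_fOuter k arr 0 (fun j hj => by omega)
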